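-- pv_equiv track=rewrite | github.com/EugeneChecheta/LUTOhayse.bots | Constaruction_CT.py | calculate_sizes
-- ===== SOURCE A (Python) =====
-- def calculate_sizes(modules, module_lengths):
--     """Вычисляет размеры дивана на основе последовательности модулей Вельтраум"""
--     if len(modules) <= 1:
--         if modules and modules[0] in module_lengths:
--             return [str(module_lengths[modules[0]])]
--         return []
--
--     # Находим индексы угловых модулей (04), которые не на краях
--     split_indices = []
--     for i, module in enumerate(modules):
--         if module == "04" and 0 < i < len(modules) - 1:
--             split_indices.append(i)
--
--     if not split_indices:
--         total = sum(module_lengths.get(m, 0) for m in modules)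
--         return [str(total)]
--
--     sizes = []
--     start_idx = 0
--
--     for split_idx in split_indices:
--         segment = modules[start_idx:split_idx + 1]
--         size = sum(module_lengths.get(m, 0) for m in segment)
--         sizes.append(str(size))
--         start_idx = split_idx
--
--     last_segment = modules[start_idx:]
--     last_size = sum(module_lengths.get(m, 0) for m in last_segment)
--     sizes.append(str(last_size))
--
--     return sizes
-- ===== SOURCE B (Python) =====
-- def calculate_sizes(modules, module_lengths):
--     """Single-pass variant: keeps a running segment sum instead of collecting split indices and slicing."""
--     if len(modules) <= 1:
--         if modules and modules[0] in module_lengths: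
--             return [str(module_lengths[modules[0]])]
--         return []
--     n = len(modules)
--     sizes = []
--     cur = 0
--     for i, module in enumerate(modules):
--         length = module_lengths.get(module, 0)
--         cur += length
--         if module == "04" and 0 < i < n - 1:
--             sizes.append(str(cur))
--             cur = length  # boundary corner module starts the next segment too
--     sizes.append(str(cur))
--     return sizes
-- ===== Notes on version B (the rewrite author's own statement) =====
-- stated objective: simpler
-- what changed: Replaced A's three phases (collect interior-'04' indices, then slice the module list per index and re-sum each overlapping segment, then sum the tail) with one pass over enumerate(modules) that keeps a running segment sum, emitting it and restarting it at the corner module's own length at each interior '04'.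
import Mathlib
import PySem

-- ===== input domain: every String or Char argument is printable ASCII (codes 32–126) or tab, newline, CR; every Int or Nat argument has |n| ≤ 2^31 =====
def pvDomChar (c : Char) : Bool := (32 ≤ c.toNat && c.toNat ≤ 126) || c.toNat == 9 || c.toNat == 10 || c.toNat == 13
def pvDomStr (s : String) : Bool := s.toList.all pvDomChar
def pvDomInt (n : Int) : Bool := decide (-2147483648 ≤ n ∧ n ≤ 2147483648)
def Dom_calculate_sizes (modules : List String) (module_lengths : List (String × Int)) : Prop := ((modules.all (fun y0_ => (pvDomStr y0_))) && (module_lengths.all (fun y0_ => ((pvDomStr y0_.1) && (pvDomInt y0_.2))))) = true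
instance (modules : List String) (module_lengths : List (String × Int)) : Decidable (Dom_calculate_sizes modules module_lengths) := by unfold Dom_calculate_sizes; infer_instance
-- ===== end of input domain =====

-- B replaces A's three-phase scheme (collect interior-"04" indices, then slice and re-sum each
-- overlapping segment) with one pass holding a running segment sum; objective: simpler, same result.

-- ===== PORT A =====

-- sum(module_lengths.get(m, 0) for m in segment)
def segSum (d : PySem.Dict String Int) (ms : List String) : Int :=
  ms.foldl (fun s m => s + d.getD m 0) 0

-- the 'for i, module in enumerate(modules)' loop collecting split_indices
def findSplits (n : Nat) : List String → Nat → List Nat → List Nat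
  | [], _, acc => acc
  | m :: rest, i, acc =>
      findSplits n rest (i + 1) (if m = "04" ∧ 0 < i ∧ i < n - 1 then acc ++ [i] else acc)

-- the 'for split_idx in split_indices' loop; state = (sizes, start_idx)
def aLoop (d : PySem.Dict String Int) (modules : List String) :
    List Nat → Nat → List String → List String × Nat
  | [], start, sizes => (sizes, start)
  | s :: ss, start, sizes =>
      aLoop d modules ss s
        (sizes ++ [PySem.Int.toStr (segSum d (PySem.List.slice modules (some (start : Int)) (some ((s : Int) + 1))))])

def calculate_sizes (modules : List String) (module_lengths : List (String × Int)) : List String :=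
  let d := PySem.Dict.mk module_lengths
  if modules.length ≤ 1 then
    match modules with
    | [] => []
    | m :: _ =>
      match d.get? m with          -- 'modules[0] in module_lengths' guard + subscript
      | some v => [PySem.Int.toStr v]
      | none => []
  else
    let splits := findSplits modules.length modules 0 []
    if splits = [] then
      [PySem.Int.toStr (segSum d modules)]
    else
      let p := aLoop d modules splits 0 []
      p.1 ++ [PySem.Int.toStr (segSum d (PySem.List.slice modules (some ((p.2 : Nat) : Int)) none))]

-- ===== PORT B =====

-- the single 'for i, module in enumerate(modules)' loop; state = (cur, sizes)
def bLoop (d : PySem.Dict String Int) (n : Nat) :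
    List String → Nat → Int → List String → List String
  | [], _, cur, sizes => sizes ++ [PySem.Int.toStr cur]
  | m :: rest, i, cur, sizes =>
      let length := d.getD m 0
      let cur' := cur + length
      if m = "04" ∧ 0 < i ∧ i < n - 1 then
        bLoop d n rest (i + 1) length (sizes ++ [PySem.Int.toStr cur'])
      else
        bLoop d n rest (i + 1) cur' sizes

def calculate_sizes_alt (modules : List String) (module_lengths : List (String × Int)) : List String :=
  let d := PySem.Dict.mk module_lengths
  if modules.length ≤ 1 then
    match modules with
    | [] => []
    | m :: _ =>
      match d.get? m with
      | some v => [PySem.Int.toStr v]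
      | none => []
  else
    bLoop d modules.length modules 0 0 []

-- ===== PRECONDITION & SPEC =====
def Spec_calculate_sizes (modules : List String) (module_lengths : List (String × Int)) (out : List String) : Prop := out = calculate_sizes_alt modules module_lengths
instance (modules : List String) (module_lengths : List (String × Int)) (out : List String) : Decidable (Spec_calculate_sizes modules module_lengths out) := by unfold Spec_calculate_sizes; infer_instance

-- ===== CLAIM (what is proved, stated in full; the proofs are below) =====
def Claim_equal_calculate_sizes : Prop := ∀ (modules : List String) (module_lengths : List (String × Int)), Dom_calculate_sizes modules module_lengths → Spec_calculate_sizes modules module_lengths (calculate_sizes modules module_lengths)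

-- ===== LEMMAS AND PROOFS =====

-- proof-side reference: A's segment list, expressed with drop/take over the full list
def aRun (d : PySem.Dict String Int) (modules : List String) : List Nat → Nat → List String
  | [], start => [PySem.Int.toStr (segSum d (modules.drop start))]
  | s :: ss, start =>
      PySem.Int.toStr (segSum d (((modules.drop start).take (s + 1 - start)))) :: aRun d modules ss s

-- proof-side reference for B's loop on a suffix, driven by the split-index list
def gen (d : PySem.Dict String Int) : List Nat → Nat → Int → List String → List String
  | [], _, cur, rest => [PySem.Int.toStr (cur + segSum d rest)]
  | s :: ss, i, cur, rest =>
      PySem.Int.toStr (cur + segSum d (rest.take (s + 1 - i))) ::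
        gen d ss (s + 1) (d.getD "04" 0) (rest.drop (s + 1 - i))

-- well-formedness of a split-index list relative to the full module list
def SplitsOK (modules : List String) : Nat → List Nat → Prop
  | _, [] => True
  | i, s :: ss => i ≤ s ∧ modules[s]? = some "04" ∧ SplitsOK modules (s + 1) ss

theorem segSum_eq (d : PySem.Dict String Int) (ms : List String) :
    segSum d ms = (ms.map (fun m => d.getD m 0)).sum := by
  simpa using PySem.List.foldl_add ms (fun m => d.getD m 0) 0

theorem segSum_cons (d : PySem.Dict String Int) (m : String) (ms : List String) :
    segSum d (m :: ms) = d.getD m 0 + segSum d ms := by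
  simp [segSum_eq]

theorem segSum_append (d : PySem.Dict String Int) (xs ys : List String) :
    segSum d (xs ++ ys) = segSum d xs + segSum d ys := by
  simp [segSum_eq]

theorem findSplits_acc (n : Nat) (rest : List String) (i : Nat) (acc : List Nat) :
    findSplits n rest i acc = acc ++ findSplits n rest i [] := by
  induction rest generalizing i acc with
  | nil => simp [findSplits]
  | cons m rest ih =>
    simp only [findSplits]
    by_cases h : m = "04" ∧ 0 < i ∧ i < n - 1
    · rw [if_pos h, if_pos h, ih (i + 1) (acc ++ [i]), ih (i + 1) ([] ++ [i])]
      simp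
    · rw [if_neg h, if_neg h]
      exact ih (i + 1) acc

theorem mem_findSplits_le (n : Nat) (rest : List String) (i : Nat) (x : Nat)
    (hx : x ∈ findSplits n rest i []) : i ≤ x := by
  induction rest generalizing i with
  | nil => simp [findSplits] at hx
  | cons m rest ih =>
    simp only [findSplits] at hx
    rw [findSplits_acc] at hx
    by_cases h : m = "04" ∧ 0 < i ∧ i < n - 1
    · rw [if_pos h] at hx
      rcases List.mem_append.mp hx with h1 | h1
      · simp at h1; omega
      · have := ih (i + 1) h1; omega
    · rw [if_neg h] at hx
      simp at hx
      have := ih (i + 1) hx; omega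

theorem bLoop_acc (d : PySem.Dict String Int) (n : Nat) (rest : List String)
    (i : Nat) (cur : Int) (sizes : List String) :
    bLoop d n rest i cur sizes = sizes ++ bLoop d n rest i cur [] := by
  induction rest generalizing i cur sizes with
  | nil => simp [bLoop]
  | cons m rest ih =>
    simp only [bLoop]
    by_cases h : m = "04" ∧ 0 < i ∧ i < n - 1
    · rw [if_pos h, if_pos h,
        ih (i + 1) (d.getD m 0) (sizes ++ [PySem.Int.toStr (cur + d.getD m 0)]),
        ih (i + 1) (d.getD m 0) ([] ++ [PySem.Int.toStr (cur + d.getD m 0)])]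
      simp
    · rw [if_neg h, if_neg h]
      exact ih (i + 1) (cur + d.getD m 0) sizes

-- shifting gen one element into the accumulated sum (only the head split's bound is needed)
theorem gen_shift (d : PySem.Dict String Int) (ss : List Nat) (i : Nat) (cur : Int)
    (m : String) (rest : List String)
    (hss : ∀ x ∈ ss, i + 1 ≤ x) :
    gen d ss i cur (m :: rest) = gen d ss (i + 1) (cur + d.getD m 0) rest := by
  cases ss with
  | nil => simp [gen, segSum_cons, add_assoc]
  | cons s ss =>
    have hs : i + 1 ≤ s := hss s (by simp)
    have h1 : s + 1 - i = (s + 1 - (i + 1)) + 1 := by omega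
    have h2 : (m :: rest).take (s + 1 - i) = m :: rest.take (s + 1 - (i + 1)) := by
      rw [h1]; rfl
    have h3 : (m :: rest).drop (s + 1 - i) = rest.drop (s + 1 - (i + 1)) := by
      rw [h1]; rfl
    simp only [gen, h2, h3, segSum_cons]
    ring_nf

-- B's loop equals gen over the split indices it would find
theorem bLoop_eq_gen (d : PySem.Dict String Int) (n : Nat) (rest : List String)
    (i : Nat) (cur : Int) :
    bLoop d n rest i cur [] = gen d (findSplits n rest i []) i cur rest := by
  induction rest generalizing i cur with
  | nil => simp [bLoop, findSplits, gen, segSum]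
  | cons m rest ih =>
    simp only [bLoop, findSplits]
    rw [findSplits_acc]
    by_cases h : m = "04" ∧ 0 < i ∧ i < n - 1
    · rw [if_pos h, if_pos h, bLoop_acc]
      have h1 : i + 1 - i = 1 := by omega
      simp only [List.cons_append, List.nil_append, gen, h1,
        List.take_succ_cons, List.take_zero, List.drop_succ_cons, List.drop_zero]
      rw [ih (i + 1) (d.getD m 0), h.1]
      simp [segSum]
    · rw [if_neg h, if_neg h]
      simp only [List.nil_append]
      rw [ih (i + 1) (cur + d.getD m 0), ← gen_shift]
      intro x hx
      exact mem_findSplits_le n rest (i + 1) x hx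

theorem SplitsOK_mono (modules : List String) (i j : Nat) (ss : List Nat)
    (hij : i ≤ j) (h : SplitsOK modules j ss) : SplitsOK modules i ss := by
  cases ss with
  | nil => trivial
  | cons s ss => exact ⟨le_trans hij h.1, h.2.1, h.2.2⟩

-- gen over a well-formed split list equals A's segment list
theorem gen_eq_aRun (d : PySem.Dict String Int) (modules : List String) (ss : List Nat)
    (start i : Nat) (cur : Int)
    (hsi : start ≤ i)
    (hok : SplitsOK modules i ss)
    (hcur : cur = segSum d ((modules.drop start).take (i - start))) :
    gen d ss i cur (modules.drop i) = aRun d modules ss start := by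
  induction ss generalizing start i cur with
  | nil =>
    simp only [gen, aRun]
    have h2 : start + (i - start) = i := by omega
    have hsplit : modules.drop start =
        (modules.drop start).take (i - start) ++ modules.drop i := by
      conv_lhs => rw [← List.take_append_drop (i - start) (modules.drop start)]
      rw [List.drop_drop, h2]
    rw [hsplit, segSum_append, hcur]
  | cons s ss ih =>
    obtain ⟨his, hmod, hok'⟩ := hok
    have hslen : s < modules.length := by
      by_contra hc
      rw [List.getElem?_eq_none (by omega)] at hmod
      simp at hmod
    simp only [gen, aRun]
    have hdd : (modules.drop i).drop (s + 1 - i) = modules.drop (s + 1) := by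
      rw [List.drop_drop]; congr 1; omega
    rw [hdd]
    congr 1
    · -- heads agree
      congr 1
      have htake : (modules.drop start).take (s + 1 - start) =
          (modules.drop start).take (i - start) ++ (modules.drop i).take (s + 1 - i) := by
        have h1 : s + 1 - start = (i - start) + (s + 1 - i) := by omega
        rw [h1, List.take_add, List.drop_drop]
        congr 3
        omega
      rw [htake, segSum_append, hcur]
    · -- tails agree via the IH at start' = s, i' = s + 1
      apply ih s (s + 1) _ (by omega) hok'
      have hds : modules.drop s = "04" :: modules.drop (s + 1) := by
        rw [List.drop_eq_getElem_cons hslen]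
        have hg : modules[s] = "04" := by
          have hge := List.getElem?_eq_getElem hslen
          rw [hge] at hmod
          exact Option.some.inj hmod
        rw [hg]
      have h1 : s + 1 - s = 1 := by omega
      rw [h1, hds]
      simp [segSum]

-- findSplits produces a well-formed split list
theorem findSplits_ok (modules : List String) (n : Nat) (rest : List String) (i : Nat)
    (hrest : rest = modules.drop i) :
    SplitsOK modules i (findSplits n rest i []) := by
  induction rest generalizing i with
  | nil => simp [findSplits, SplitsOK]
  | cons m rest ih =>
    simp only [findSplits]
    rw [findSplits_acc]
    have hlen : i < modules.length := by
      by_contra hc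
      rw [List.drop_eq_nil_of_le (by omega)] at hrest
      simp at hrest
    have hcons : modules.drop i = modules[i] :: modules.drop (i + 1) :=
      List.drop_eq_getElem_cons hlen
    have hinj := List.cons.inj (hrest.trans hcons)
    have hm : modules[i]? = some m := by
      rw [List.getElem?_eq_getElem hlen]
      exact congrArg some hinj.1.symm
    have hrest' : rest = modules.drop (i + 1) := hinj.2
    by_cases h : m = "04" ∧ 0 < i ∧ i < n - 1
    · rw [if_pos h]
      simp only [List.cons_append, List.nil_append, SplitsOK]
      exact ⟨le_refl i, by rw [hm, h.1], ih (i + 1) hrest'⟩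
    · rw [if_neg h]
      simp only [List.nil_append]
      exact SplitsOK_mono modules i (i + 1) _ (by omega) (ih (i + 1) hrest')

-- A's actual loop (with PySem slices) computes aRun
theorem aLoop_eq_aRun (d : PySem.Dict String Int) (modules : List String)
    (ss : List Nat) (start : Nat) (sizes : List String) :
    (aLoop d modules ss start sizes).1 ++
      [PySem.Int.toStr (segSum d (PySem.List.slice modules (some (((aLoop d modules ss start sizes).2 : Nat) : Int)) none))] =
    sizes ++ aRun d modules ss start := by
  induction ss generalizing start sizes with
  | nil =>
    simp only [aLoop, aRun]
    rw [PySem.List.slice_from_natCast]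
  | cons s ss ih =>
    simp only [aLoop, aRun]
    rw [ih]
    have : PySem.List.slice modules (some ((start : Nat) : Int)) (some (((s : Nat) : Int) + 1)) =
        (modules.drop start).take (s + 1 - start) := by
      have : ((s : Nat) : Int) + 1 = (((s + 1 : Nat)) : Int) := by push_cast; ring
      rw [this, PySem.List.slice_natCast]
    rw [this]
    simp

-- ===== VERDICT (by name: the statement is the Claim_ definition above) =====
theorem calculate_sizes_spec : Claim_equal_calculate_sizes := by
  intro modules module_lengths _
  unfold Spec_calculate_sizes calculate_sizes calculate_sizes_alt
  set d := PySem.Dict.mk module_lengths with hd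
  by_cases hlen : modules.length ≤ 1
  · simp [hlen]
  · simp only [hlen, if_false]
    rw [bLoop_eq_gen]
    have hok : SplitsOK modules 0 (findSplits modules.length modules 0 []) :=
      findSplits_ok modules modules.length modules 0 (by simp)
    have hgen : gen d (findSplits modules.length modules 0 []) 0 0 (modules.drop 0) =
        aRun d modules (findSplits modules.length modules 0 []) 0 :=
      gen_eq_aRun d modules _ 0 0 0 (le_refl 0) hok (by simp [segSum])
    rw [List.drop_zero] at hgen
    rw [hgen]
    by_cases hsp : findSplits modules.length modules 0 [] = []
    · rw [if_pos hsp, hsp]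
      simp [aRun]
    · rw [if_neg hsp]
      have := aLoop_eq_aRun d modules (findSplits modules.length modules 0 []) 0 []
      simpa using this
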